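-- pv_equiv track=rewrite | github.com/git-men/lightning | service/api/serializers.py | range_expand_fields
-- ===== SOURCE A (Python) =====
-- def range_expand_fields(fields):
--     assert isinstance(fields, list), '扩展字段应该是一个列表'
--
--     result = {}
--     for item in fields:
--         if '.' not in item:
--             if item not in result:
--                 result[item] = [item]
--         else:
--             name = item.split('.', maxsplit=1)[0]
--             if name not in result:
--                 result[name] = [item]
--             else:
--                 result[name].append(item)
--
--     for key, value in result.items():
--         result[key] = sorted(value, key=len, reverse=True)[0].split('.')
--     return result
-- ===== SOURCE B (Python) =====
-- def range_expand_fields(fields):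
--     assert isinstance(fields, list), '扩展字段应该是一个列表'
--
--     best = {}
--     for item in fields:
--         key = item if '.' not in item else item.split('.', maxsplit=1)[0]
--         if key not in best:
--             best[key] = item
--         elif '.' in item and len(item) > len(best[key]):
--             best[key] = item
--     return {key: value.split('.') for key, value in best.items()}
-- ===== Notes on version B (the rewrite author's own statement) =====
-- stated objective: simpler
-- what changed: One pass keeps only the longest field string seen per prefix (replacing only on strictly greater length, so the first maximum wins exactly like A's stable reverse sort), then each best string is split once; A's grouping into per-key lists and per-key reverse sort disappear.
import Mathlib
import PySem

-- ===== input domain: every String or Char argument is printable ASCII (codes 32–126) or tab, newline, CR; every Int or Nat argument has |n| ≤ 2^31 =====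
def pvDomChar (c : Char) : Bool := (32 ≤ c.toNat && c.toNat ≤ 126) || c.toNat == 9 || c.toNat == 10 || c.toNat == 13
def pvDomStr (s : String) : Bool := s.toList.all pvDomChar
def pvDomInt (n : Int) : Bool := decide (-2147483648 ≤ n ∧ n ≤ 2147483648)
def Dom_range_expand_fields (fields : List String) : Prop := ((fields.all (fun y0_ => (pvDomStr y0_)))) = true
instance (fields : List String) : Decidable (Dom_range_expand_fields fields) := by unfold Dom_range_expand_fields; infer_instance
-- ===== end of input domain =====

-- B keeps one longest-so-far string per '.'-prefix in a single pass instead of A's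
-- per-key lists reverse-sorted afterwards; equivalence of the return values is proved below.

-- ===== PORT A =====
-- item.split('.')  (sep ≠ "" so split? is always some; getD [] is unreachable)
def pvSplitDot (s : String) : List String := (PySem.Str.split? s ".").getD []

-- the body of A's first loop ('for item in fields: …')
def pvStepA (result : PySem.Dict String (List String)) (item : String) :
    PySem.Dict String (List String) :=
  if PySem.Str.isIn "." item = false then
    (if result.contains item = false then result.insert item [item] else result)
  else
    -- name = item.split('.', maxsplit=1)[0]  ([0] of a never-empty split; headD "" unreachable)
    let name := ((PySem.Str.splitMax? item "." 1).getD []).headD ""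
    if result.contains name = false then result.insert name [item]
    else result.modify name [] (fun v => v ++ [item])

def range_expand_fields (fields : List String) : List (String × List String) :=
  let result := fields.foldl pvStepA PySem.Dict.empty
  -- second loop: 'for key, value in result.items(): result[key] = sorted(value, key=len, reverse=True)[0].split('.')'
  -- (every stored list is nonempty, so '[0]' — ported as headD "" — never hits the default)
  (result.items.foldl
      (fun (r : PySem.Dict String (List String)) kv =>
        r.insert kv.1 (pvSplitDot ((PySem.List.sorted kv.2 PySem.Str.len true).headD "")))
      result).items

-- ===== PORT B =====
-- the body of B's single loop
def pvStepB (best : PySem.Dict String String) (item : String) : PySem.Dict String String :=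
  let key := if PySem.Str.isIn "." item = false then item
             else ((PySem.Str.splitMax? item "." 1).getD []).headD ""
  if best.contains key = false then best.insert key item
  else if PySem.Str.isIn "." item
          && decide (PySem.Str.len (best.getD key "") < PySem.Str.len item) then
    best.insert key item
  else best

def range_expand_fields_alt (fields : List String) : List (String × List String) :=
  let best := fields.foldl pvStepB PySem.Dict.empty
  best.items.map (fun kv => (kv.1, pvSplitDot kv.2))

-- ===== PRECONDITION & SPEC =====
def Spec_range_expand_fields (fields : List String) (out : List (String × List String)) : Prop := out = range_expand_fields_alt fields
instance (fields : List String) (out : List (String × List String)) : Decidable (Spec_range_expand_fields fields out) := by unfold Spec_range_expand_fields; infer_instance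

-- ===== CLAIM (what is proved, stated in full; the proofs are below) =====
def Claim_equal_range_expand_fields : Prop := ∀ (fields : List String), Dom_range_expand_fields fields → Spec_range_expand_fields fields (range_expand_fields fields)

-- ===== LEMMAS AND PROOFS =====

def pvBetter (b x : String) : String := if PySem.Str.len b < PySem.Str.len x then x else b
def pvBestOf (v : List String) : String := v.foldl pvBetter ""

theorem ins_nil (bf : String → String → Bool) (x : String) : PySem.List.insertBy bf x [] = [x] := by
  simp [PySem.List.insertBy]

theorem ins_cons (bf : String → String → Bool) (x y : String) (ys : List String) :
    PySem.List.insertBy bf x (y :: ys) = if bf x y then x :: y :: ys else y :: PySem.List.insertBy bf x ys := by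
  simp [PySem.List.insertBy]

theorem ins_ne_nil (bf : String → String → Bool) (x : String) (l : List String) :
    PySem.List.insertBy bf x l ≠ [] := by
  cases l with
  | nil => simp [ins_nil]
  | cons y ys => rw [ins_cons]; split <;> simp

theorem head_ins (bf : String → String → Bool) (x y : String) (ys : List String) (d : String) :
    (PySem.List.insertBy bf x (y :: ys)).headD d = if bf x y then x else y := by
  rw [ins_cons]; split <;> simp

theorem headFold (v : List String) : ∀ (acc : List String), acc ≠ [] →
    ((v.foldl (fun acc x => PySem.List.insertBy (fun a b => decide (PySem.Str.len b < PySem.Str.len a)) x acc) acc).headD "")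
      = v.foldl pvBetter (acc.headD "") := by
  induction v with
  | nil => intro acc h; simp
  | cons x t ih =>
    intro acc h
    cases acc with
    | nil => exact absurd rfl h
    | cons y ys =>
      simp only [List.foldl_cons]
      rw [ih _ (ins_ne_nil _ _ _), head_ins]
      have : (if (fun a b => decide (PySem.Str.len b < PySem.Str.len a)) x y = true then x else y) = pvBetter ((y :: ys).headD "") x := by
        unfold pvBetter; simp
      rw [this]

theorem pvBetter_empty (x : String) : pvBetter "" x = x := by
  by_cases h : PySem.Str.len "" < PySem.Str.len x
  · simp [pvBetter, h]
  · have h0 : PySem.Str.len x = 0 := by simp [PySem.Str.len] at h ⊢; omega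
    have : x = "" := by simpa [PySem.Str.len] using h0
    simp [pvBetter, this]

theorem pvHead_sorted_rev (v : List String) :
    (PySem.List.sorted v PySem.Str.len true).headD "" = pvBestOf v := by
  cases v with
  | nil => rw [PySem.List.sorted_rev_eq_foldl_insertBy]; simp [pvBestOf]
  | cons x t =>
    rw [PySem.List.sorted_rev_eq_foldl_insertBy]
    simp only [List.foldl_cons, ins_nil]
    rw [headFold t [x] (by simp)]
    simp [pvBestOf, pvBetter_empty]

theorem pvBestOf_singleton (x : String) : pvBestOf [x] = x := by
  simp [pvBestOf, pvBetter_empty]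

theorem pvBestOf_append (v : List String) (x : String) :
    pvBestOf (v ++ [x]) = pvBetter (pvBestOf v) x := by
  simp [pvBestOf, List.foldl_append]

def pvRel (dA : PySem.Dict String (List String)) (dB : PySem.Dict String String) : Prop :=
  dB.items = dA.items.map (fun kv => (kv.1, pvBestOf kv.2))

theorem pvRel_contains {dA : PySem.Dict String (List String)} {dB : PySem.Dict String String}
    (h : pvRel dA dB) (k : String) : dB.contains k = dA.contains k := by
  unfold pvRel at h
  simp only [PySem.Dict.contains, h, List.any_map]
  rfl

theorem pvRel_get? {dA : PySem.Dict String (List String)} {dB : PySem.Dict String String}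
    (h : pvRel dA dB) (k : String) : dB.get? k = (dA.get? k).map pvBestOf := by
  unfold pvRel at h
  simp only [PySem.Dict.get?, h, List.find?_map, Option.map_map]
  rfl

-- fresh-key insert preserves the relation
theorem pvRel_insert_fresh {dA : PySem.Dict String (List String)} {dB : PySem.Dict String String}
    (h : pvRel dA dB) (k item : String) (hc : dA.contains k = false) :
    pvRel (dA.insert k [item]) (dB.insert k item) := by
  unfold pvRel
  rw [PySem.Dict.items_insert_of_not_contains dA _ hc,
      PySem.Dict.items_insert_of_not_contains dB _ (by rw [pvRel_contains h]; exact hc)]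
  unfold pvRel at h
  simp [h, pvBestOf_singleton]

theorem pvStep_invariant {dA : PySem.Dict String (List String)} {dB : PySem.Dict String String}
    (hn : dA.keys.Nodup) (h : pvRel dA dB) (item : String) :
    (pvStepA dA item).keys.Nodup ∧ pvRel (pvStepA dA item) (pvStepB dB item) := by
  by_cases hdot : PySem.Str.isIn "." item = false
  · -- dotless: key = item
    by_cases hc : dA.contains item = false
    · constructor
      · simp only [pvStepA, hdot, if_true, hc]
        simpa using PySem.Dict.nodup_keys_insert dA item [item] hn
      · simp only [pvStepA, pvStepB, hdot, if_true, hc, pvRel_contains h]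
        exact pvRel_insert_fresh h item item hc
    · have hc' : dB.contains item = false ↔ False := by
        rw [pvRel_contains h]; simpa using hc
      constructor
      · simp only [pvStepA, hdot, if_true, if_neg hc]; exact hn
      · simp only [pvStepA, pvStepB, hdot, if_true, if_neg hc, hc', if_false]
        simp [hdot]
        exact h
  · -- dotted: key = name
    have hdot' : PySem.Str.isIn "." item = true := by simpa using hdot
    set name := ((PySem.Str.splitMax? item "." 1).getD []).headD "" with hname
    have hA : pvStepA dA item =
        (if dA.contains name = false then dA.insert name [item]
         else dA.modify name [] (fun v => v ++ [item])) := by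
      unfold pvStepA
      rw [hdot']
      rfl
    have hB : pvStepB dB item =
        (if dB.contains name = false then dB.insert name item
         else if PySem.Str.isIn "." item
                && decide (PySem.Str.len (dB.getD name "") < PySem.Str.len item) then
           dB.insert name item
         else dB) := by
      unfold pvStepB
      rw [hdot']
      rfl
    by_cases hc : dA.contains name = false
    · constructor
      · rw [hA, if_pos hc]
        exact PySem.Dict.nodup_keys_insert dA name [item] hn
      · rw [hA, hB, if_pos hc, if_pos (by rw [pvRel_contains h]; exact hc)]
        exact pvRel_insert_fresh h name item hc
    · -- existing key: A appends, B keeps the longer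
      have hcT : dA.contains name = true := by simpa using hc
      obtain ⟨v, hv⟩ : ∃ v, dA.get? name = some v := by
        have := PySem.Dict.contains_eq_isSome_get? dA name
        rw [hcT] at this
        exact Option.isSome_iff_exists.mp this.symm
      have hgB : dB.getD name "" = pvBestOf v := by
        simp [PySem.Dict.getD, pvRel_get? h, hv]
      have hgA : dA.getD name [] = v := by simp [PySem.Dict.getD, hv]
      have hcB : dB.contains name = true := by rw [pvRel_contains h]; exact hcT
      have hstepA : pvStepA dA item = dA.insert name (v ++ [item]) := by
        rw [hA, if_neg hc, PySem.Dict.modify, hgA]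
      constructor
      · rw [hstepA]; exact PySem.Dict.nodup_keys_insert dA name _ hn
      · rw [hstepA]
        by_cases hlt : (pvBestOf v).length < item.length
        · have hstepB : pvStepB dB item = dB.insert name item := by
            rw [hB, hcB, hgB, hdot']
            simp [hlt, PySem.Str.len]
          rw [hstepB]
          unfold pvRel
          rw [PySem.Dict.items_insert_of_contains dA _ hcT,
              PySem.Dict.items_insert_of_contains dB _ hcB]
          unfold pvRel at h
          rw [h, List.map_map, List.map_map]
          apply List.map_congr_left
          intro p _
          by_cases hp : p.1 = name
          · simp only [Function.comp, hp, beq_self_eq_true, if_true]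
            simp [pvBestOf_append, pvBetter, PySem.Str.len, hlt]
          · simp [Function.comp, hp]
        · have hstepB : pvStepB dB item = dB := by
            rw [hB, hcB, hgB, hdot']
            simp [hlt, PySem.Str.len]
          rw [hstepB]
          unfold pvRel
          rw [PySem.Dict.items_insert_of_contains dA _ hcT]
          unfold pvRel at h
          rw [h, List.map_map]
          apply List.map_congr_left
          intro p hp
          by_cases hpk : p.1 = name
          · have hpv : p.2 = v := by
              have hg : dA.get? p.1 = some p.2 :=
                PySem.Dict.get?_of_mem_items dA (by exact hp) hn
              rw [hpk, hv] at hg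
              exact (Option.some_inj.mp hg).symm
            simp only [Function.comp, hpk, beq_self_eq_true, if_true]
            simp [pvBestOf_append, pvBetter, PySem.Str.len, hlt, hpv]
          · simp [Function.comp, hpk]

theorem pvFold_invariant (fields : List String) :
    ∀ (dA : PySem.Dict String (List String)) (dB : PySem.Dict String String),
    dA.keys.Nodup → pvRel dA dB →
    (fields.foldl pvStepA dA).keys.Nodup ∧
      pvRel (fields.foldl pvStepA dA) (fields.foldl pvStepB dB) := by
  induction fields with
  | nil => intro dA dB hn h; exact ⟨hn, h⟩
  | cons x t ih =>
    intro dA dB hn h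
    obtain ⟨hn', h'⟩ := pvStep_invariant hn h x
    simpa using ih (pvStepA dA x) (pvStepB dB x) hn' h'

theorem pvFinal_fold (g : List String → List String) :
    ∀ (l : List (String × List String)) (d : PySem.Dict String (List String)),
      (l.map Prod.fst).Nodup → (∀ kv ∈ l, d.contains kv.1 = true) →
      (l.foldl (fun r kv => r.insert kv.1 (g kv.2)) d).items =
        d.items.map (fun p =>
          match l.find? (fun kv => kv.1 == p.1) with
          | some kv => (p.1, g kv.2)
          | none => p) := by
  intro l
  induction l with
  | nil => intro d _ _; simp
  | cons kv t ih =>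
    intro d hnod hc
    have hck : d.contains kv.1 = true := hc kv (by simp)
    have hnod' : (kv.1 :: t.map Prod.fst).Nodup := by rw [List.map_cons] at hnod; exact hnod
    have hnodc := List.nodup_cons.mp hnod'
    have hkt : ∀ x ∈ t, ¬ (x.1 = kv.1) := by
      intro x hx he
      exact hnodc.1 (List.mem_map.mpr ⟨x, hx, he⟩)
    have hc' : ∀ x ∈ t, (d.insert kv.1 (g kv.2)).contains x.1 = true := by
      intro x hx
      rw [PySem.Dict.contains_insert]
      simp [hc x (by simp [hx])]
    simp only [List.foldl_cons]
    rw [ih (d.insert kv.1 (g kv.2)) hnodc.2 hc',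
        PySem.Dict.items_insert_of_contains d _ hck, List.map_map]
    apply List.map_congr_left
    intro p _
    by_cases hp : p.1 = kv.1
    · have hfind : t.find? (fun x => x.1 == kv.1) = none := by
        rw [List.find?_eq_none]
        intro x hx
        simpa using hkt x hx
      simp [Function.comp, hp, hfind]
    · have hne : ¬ (kv.1 == p.1) = true := by simpa using fun he => hp (by rw [he])
      simp [Function.comp, hp, List.find?_cons, hne]

theorem pvMain (fields : List String) :
    range_expand_fields fields = range_expand_fields_alt fields := by
  obtain ⟨hn, hrel⟩ := pvFold_invariant fields PySem.Dict.empty PySem.Dict.empty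
    PySem.Dict.nodup_keys_empty (by unfold pvRel; rfl)
  unfold range_expand_fields range_expand_fields_alt
  set dA := fields.foldl pvStepA PySem.Dict.empty with hdA
  set dB := fields.foldl pvStepB PySem.Dict.empty with hdB
  have hnod : (dA.items.map Prod.fst).Nodup := hn
  have hc : ∀ kv ∈ dA.items, dA.contains kv.1 = true := by
    intro kv hkv
    exact List.any_eq_true.mpr ⟨kv, hkv, by simp⟩
  rw [pvFinal_fold (fun v => pvSplitDot ((PySem.List.sorted v PySem.Str.len true).headD ""))
        dA.items dA hnod hc]
  unfold pvRel at hrel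
  show _ = dB.items.map (fun kv => (kv.1, pvSplitDot kv.2))
  rw [hrel, List.map_map]
  apply List.map_congr_left
  intro p hp
  have hg : dA.get? p.1 = some p.2 := PySem.Dict.get?_of_mem_items dA hp hn
  obtain ⟨q, hq, hq2⟩ : ∃ q, dA.items.find? (fun kv => kv.1 == p.1) = some q ∧ q.2 = p.2 := by
    unfold PySem.Dict.get? at hg
    obtain ⟨q, hq, hq2⟩ := Option.map_eq_some_iff.mp hg
    exact ⟨q, hq, hq2⟩
  rw [hq]
  show (p.1, pvSplitDot ((PySem.List.sorted q.2 PySem.Str.len true).headD "")) =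
    (p.1, pvSplitDot (pvBestOf p.2))
  rw [hq2, pvHead_sorted_rev]

-- ===== VERDICT (by name: the statement is the Claim_ definition above) =====
theorem range_expand_fields_spec : Claim_equal_range_expand_fields := by
  intro fields _
  unfold Spec_range_expand_fields
  exact pvMain fields
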